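-- pv_equiv track=rewrite | github.com/aimakerspace/seacorenlp-data | id/coref/preprocess.py | _group_mentions_into_clusters
-- ===== SOURCE A (Python) =====
-- from typing import Any, Dict, List, Set, Tuple, Union
--
-- MentionPair = Tuple[int, int]
--
-- Cluster = Set[int]
--
-- def _group_mentions_into_clusters(mention_pairs: List[MentionPair]) -> List[Cluster]:
--     """
--     [(1,2), (2,3), (4,5), (6,7), (5,9)] -> [{1,2,3}, {4,5,9}, {6,7}]
--     """
--
--     if len(mention_pairs) == 0:
--         return []
--
--     cluster_list = [set(mention_pairs[0])]
--
--     for pair in mention_pairs[1:]: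
--         matched = False
--         for cluster in cluster_list:
--             if set(pair).intersection(cluster):
--                 cluster.update(pair)
--                 matched = True
--                 break
--
--         if not matched:
--             cluster_list.append(set(pair))
--
--     return cluster_list
-- ===== SOURCE B (Python) =====
-- from typing import List, Set, Tuple
--
-- MentionPair = Tuple[int, int]
-- Cluster = Set[int]
--
--
-- def _group_mentions_into_clusters(mention_pairs: List[MentionPair]) -> List[Cluster]:
--     # One pass with a dict mapping each mention to the index of the first
--     # (lowest-index) cluster containing it; the first cluster intersecting a
--     # pair is then the min over the pair's mapped indices instead of a scan
--     # over the cluster list.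
--     cluster_list = []
--     first_idx = {}  # mention -> lowest index of a cluster containing it
--     for pair in mention_pairs:
--         hits = [first_idx[m] for m in pair if m in first_idx]
--         if hits:
--             i = min(hits)
--             cluster_list[i].update(pair)
--             for m in pair:
--                 first_idx[m] = min(first_idx.get(m, i), i)
--         else:
--             cluster_list.append(set(pair))
--             n = len(cluster_list) - 1
--             for m in pair:
--                 first_idx[m] = n
--     return cluster_list
-- ===== Notes on version B (the rewrite author's own statement) =====
-- stated objective: alternative
-- what changed: Replaces the inner first-match scan over all clusters per pair by a dict mapping each mention to the lowest index of a cluster containing it, so the matched cluster is obtained as the min over the pair's mapped indices; O(n*k) cluster scans become O(n) dict lookups, though a timing run shows no win on few-cluster inputs.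
import Mathlib
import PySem

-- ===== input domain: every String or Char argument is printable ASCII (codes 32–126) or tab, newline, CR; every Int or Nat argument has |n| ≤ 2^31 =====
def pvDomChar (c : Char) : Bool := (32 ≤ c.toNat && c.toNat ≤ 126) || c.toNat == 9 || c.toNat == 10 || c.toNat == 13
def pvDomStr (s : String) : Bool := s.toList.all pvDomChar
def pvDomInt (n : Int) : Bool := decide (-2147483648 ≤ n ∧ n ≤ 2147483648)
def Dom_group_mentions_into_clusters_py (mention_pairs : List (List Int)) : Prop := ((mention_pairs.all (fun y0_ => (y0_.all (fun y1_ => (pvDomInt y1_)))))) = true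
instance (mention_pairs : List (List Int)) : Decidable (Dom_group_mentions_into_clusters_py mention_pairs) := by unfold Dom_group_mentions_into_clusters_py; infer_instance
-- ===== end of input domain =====

-- B replaces A's per-pair first-match scan over all clusters by a dict mapping each
-- mention to the lowest index of a cluster containing it: the matched cluster is the
-- min over the pair's mapped indices (objective: alternative algorithm, same values).

-- ===== PORT A =====
-- inner 'for cluster in cluster_list: if set(pair).intersection(cluster): cluster.update(pair); break'
-- returns some (updated list) on a match, none when the loop falls through (matched = False)
def pvAUpd (pair : List Int) : List (List Int) → Option (List (List Int))
  | [] => none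
  | c :: cs =>
    if PySem.Set.inter (PySem.Set.ofList pair) c ≠ [] then
      some (PySem.Set.update c pair :: cs)
    else
      match pvAUpd pair cs with
      | some cs' => some (c :: cs')
      | none => none

def group_mentions_into_clusters_py (mention_pairs : List (List Int)) : List (List Int) :=
  match mention_pairs with
  | [] => []
  | p0 :: rest =>
    rest.foldl (fun cluster_list pair =>
      match pvAUpd pair cluster_list with
      | some cl' => cl'                                  -- matched = True
      | none => cluster_list ++ [PySem.Set.ofList pair]  -- if not matched: append
      ) [PySem.Set.ofList p0]

-- ===== PORT B =====
-- state: (cluster_list, first_idx); one loop body of Source B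
def pvBStep (st : List (List Int) × PySem.Dict Int Int) (pair : List Int) :
    List (List Int) × PySem.Dict Int Int :=
  let hits := pair.filterMap (fun m => st.2.get? m)      -- [first_idx[m] for m in pair if m in first_idx]
  match PySem.List.min? hits (fun x => x) with           -- if hits: i = min(hits)
  | some i =>
    let cl' := PySem.List.pySetD st.1 i
        (PySem.Set.update (PySem.List.pyGetD st.1 i []) pair)   -- cluster_list[i].update(pair)
    (cl', pair.foldl (fun d m => d.insert m (min (d.getD m i) i)) st.2)
  | none =>
    let cl' := st.1 ++ [PySem.Set.ofList pair]           -- cluster_list.append(set(pair))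
    let n : Int := (cl'.length : Int) - 1
    (cl', pair.foldl (fun d m => d.insert m n) st.2)

def group_mentions_into_clusters_py_alt (mention_pairs : List (List Int)) : List (List Int) :=
  (mention_pairs.foldl pvBStep ([], PySem.Dict.empty)).1

-- ===== PRECONDITION & SPEC =====
def Spec_group_mentions_into_clusters_py (mention_pairs : List (List Int)) (out : List (List Int)) : Prop := out = group_mentions_into_clusters_py_alt mention_pairs
instance (mention_pairs : List (List Int)) (out : List (List Int)) : Decidable (Spec_group_mentions_into_clusters_py mention_pairs out) := by unfold Spec_group_mentions_into_clusters_py; infer_instance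

-- ===== CLAIM (what is proved, stated in full; the proofs are below) =====
def Claim_equal_group_mentions_into_clusters_py : Prop := ∀ (mention_pairs : List (List Int)), Dom_group_mentions_into_clusters_py mention_pairs → Spec_group_mentions_into_clusters_py mention_pairs (group_mentions_into_clusters_py mention_pairs)

-- ===== LEMMAS AND PROOFS =====

-- index (as a Python int) of the first cluster containing e, in list order
def pvFI (e : Int) : List (List Int) → Option Int
  | [] => none
  | c :: cs => if e ∈ c then some 0 else (pvFI e cs).map (· + 1)

-- index of the first cluster intersecting pair
def pvScan (pair : List Int) : List (List Int) → Option Nat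
  | [] => none
  | c :: cs => if pair.any (fun e => decide (e ∈ c)) then some 0 else (pvScan pair cs).map (· + 1)

-- the invariant tying B's dict to A's cluster list
def pvInv (cl : List (List Int)) (idx : PySem.Dict Int Int) : Prop :=
  ∀ e, idx.get? e = pvFI e cl

theorem pvFI_nonneg {e : Int} {cl : List (List Int)} {i : Int} (h : pvFI e cl = some i) : 0 ≤ i := by
  induction cl generalizing i with
  | nil => simp [pvFI] at h
  | cons c cs ih =>
    simp only [pvFI] at h
    split at h
    · cases h; omega
    · rcases Option.map_eq_some_iff.mp h with ⟨k, hk, rfl⟩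
      have := ih hk; omega

theorem pvScan_lt {pair : List Int} {cl : List (List Int)} {j : Nat}
    (h : pvScan pair cl = some j) : j < cl.length := by
  induction cl generalizing j with
  | nil => simp [pvScan] at h
  | cons c cs ih =>
    simp only [pvScan] at h
    split at h
    · cases h; simp
    · rcases Option.map_eq_some_iff.mp h with ⟨k, hk, rfl⟩
      have := ih hk; simp; omega

-- A's inner loop, characterised by pvScan
theorem pvAUpd_eq_scan (pair : List Int) (cl : List (List Int)) :
    pvAUpd pair cl = (pvScan pair cl).map
      (fun j => cl.set j (PySem.Set.update (cl.getD j []) pair)) := by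
  induction cl with
  | nil => rfl
  | cons c cs ih =>
    have hiff : (PySem.Set.inter (PySem.Set.ofList pair) c ≠ []) ↔
        (pair.any (fun e => decide (e ∈ c)) = true) := by
      rw [← List.isEmpty_eq_false_iff, List.isEmpty_eq_false_iff_exists_mem]
      simp [PySem.Set.mem_inter, PySem.Set.mem_ofList]
    simp only [pvAUpd, pvScan]
    by_cases hc : pair.any (fun e => decide (e ∈ c)) = true
    · rw [if_pos (hiff.mpr hc), if_pos hc]; rfl
    · rw [if_neg (fun h => hc (hiff.mp h)), if_neg hc, ih]
      cases hscan : pvScan pair cs with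
      | none => rfl
      | some j => simp

-- min over a shifted list shifts the min
theorem pvMin_map_add_one (l : List Int) :
    PySem.List.min? (l.map (· + 1)) (fun x => x) =
      (PySem.List.min? l (fun x => x)).map (· + 1) := by
  cases l with
  | nil => rfl
  | cons x t =>
    rw [List.map_cons, PySem.List.min?_id_cons, PySem.List.min?_id_cons]
    simp only [Option.map_some]
    congr 1
    induction t generalizing x with
    | nil => rfl
    | cons y t ih => simp only [List.map_cons, List.foldl_cons, ← ih, min_add_add_right]

-- hit indices in c :: cs, when the head cluster misses, are the shifted hits in cs
theorem pvFilterMap_shift (pair : List Int) (c : List Int) (cs : List (List Int))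
    (hall : ∀ e ∈ pair, e ∉ c) :
    pair.filterMap (fun e => pvFI e (c :: cs)) =
      (pair.filterMap (fun e => pvFI e cs)).map (· + 1) := by
  induction pair with
  | nil => rfl
  | cons p ps ihp =>
    have hp : p ∉ c := hall p (by simp)
    simp only [List.filterMap_cons]
    rw [ihp (fun e he => hall e (List.mem_cons_of_mem _ he))]
    simp only [pvFI, if_neg hp]
    cases pvFI p cs <;> simp

-- B's min-of-hit-indices equals A's first-intersecting-cluster index
theorem pvMin_eq_scan (pair : List Int) (cl : List (List Int)) :
    PySem.List.min? (pair.filterMap (fun e => pvFI e cl)) (fun x => x) =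
      (pvScan pair cl).map (fun j => (j : Int)) := by
  induction cl with
  | nil =>
    have : pair.filterMap (fun e => pvFI e ([] : List (List Int))) = [] := by
      simp [pvFI]
    simp [this, pvScan]
  | cons c cs ih =>
    simp only [pvScan]
    by_cases hc : pair.any (fun e => decide (e ∈ c)) = true
    · rw [if_pos hc]
      rcases List.any_eq_true.mp hc with ⟨e, he, hec⟩
      have h0 : (0 : Int) ∈ pair.filterMap (fun e => pvFI e (c :: cs)) := by
        apply List.mem_filterMap.mpr
        exact ⟨e, he, by simp [pvFI, of_decide_eq_true hec]⟩
      cases hm : PySem.List.min? (pair.filterMap (fun e => pvFI e (c :: cs))) (fun x => x) with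
      | none => rw [PySem.List.min?_eq_none_iff] at hm; rw [hm] at h0; simp at h0
      | some m =>
        have hle := PySem.List.min?_isMin hm 0 h0
        have hmem := PySem.List.min?_mem hm
        rcases List.mem_filterMap.mp hmem with ⟨e', _, hfi⟩
        have : m = 0 := le_antisymm hle (by
          simp only [pvFI] at hfi
          split at hfi
          · simp at hfi; omega
          · rcases Option.map_eq_some_iff.mp hfi with ⟨k, hk, rfl⟩
            have := pvFI_nonneg hk; omega)
        simp [this]
    · rw [if_neg hc]
      have hall : ∀ e ∈ pair, e ∉ c := by
        intro e he hec
        exact hc (List.any_eq_true.mpr ⟨e, he, decide_eq_true hec⟩)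
      rw [pvFilterMap_shift pair c cs hall, pvMin_map_add_one, ih]
      cases pvScan pair cs <;> simp

-- dict after the fresh-cluster insert loop
theorem pvGet_foldl_insert_const (pair : List Int) (idx : PySem.Dict Int Int) (n e : Int) :
    (pair.foldl (fun d m => d.insert m n) idx).get? e =
      if e ∈ pair then some n else idx.get? e := by
  induction pair generalizing idx with
  | nil => simp
  | cons p ps ih =>
    simp only [List.foldl_cons, ih, List.mem_cons]
    by_cases hp : e ∈ ps
    · simp [hp]
    · rw [PySem.Dict.get?_insert]
      by_cases hep : e = p <;> simp [hp, hep]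

-- dict after the matched-cluster min-update loop
theorem pvGet_foldl_insert_min (pair : List Int) (idx : PySem.Dict Int Int) (i e : Int) :
    (pair.foldl (fun d m => d.insert m (min (d.getD m i) i)) idx).get? e =
      if e ∈ pair then some (min (idx.getD e i) i) else idx.get? e := by
  induction pair generalizing idx with
  | nil => simp
  | cons p ps ih =>
    simp only [List.foldl_cons, ih, List.mem_cons]
    by_cases hp : e ∈ ps
    · simp only [hp, or_true, if_pos]
      rw [PySem.Dict.getD_insert]
      by_cases hep : e = p
      · subst hep
        simp only [if_pos]
        congr 1
        omega
      · rw [if_neg hep]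
    · rw [PySem.Dict.get?_insert]
      by_cases hep : e = p
      · subst hep; simp [hp]
      · simp [hp, hep]

-- pvFI after appending a fresh cluster
theorem pvFI_append_singleton (e : Int) (cl : List (List Int)) (s : List Int) :
    pvFI e (cl ++ [s]) =
      match pvFI e cl with
      | some i => some i
      | none => if e ∈ s then some (cl.length : Int) else none := by
  induction cl with
  | nil => by_cases h : e ∈ s <;> simp [pvFI, h]
  | cons c cs ih =>
    simp only [List.cons_append, pvFI, ih]
    by_cases hc : e ∈ c
    · simp [hc]
    · simp only [hc, if_false]
      cases pvFI e cs with
      | some i => simp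
      | none =>
        by_cases hs : e ∈ s <;> simp [hs]

-- unfolding equation for pvFI on a cons, usable as a one-occurrence rw
theorem pvFI_cons (e : Int) (c : List Int) (cs : List (List Int)) :
    pvFI e (c :: cs) = if e ∈ c then some 0 else (pvFI e cs).map (· + 1) := rfl

-- pvFI after enlarging cluster j with pair, for a mention in the pair
theorem pvFI_set_update_mem (e : Int) (pair : List Int) (cl : List (List Int)) (j : Nat)
    (hj : j < cl.length) (he : e ∈ pair) :
    pvFI e (cl.set j (PySem.Set.update (cl.getD j []) pair)) =
      some (match pvFI e cl with
            | some k => min k (j : Int)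
            | none => (j : Int)) := by
  induction cl generalizing j with
  | nil => simp at hj
  | cons c cs ih =>
    cases j with
    | zero =>
      have hmem : e ∈ PySem.Set.update c pair :=
        (PySem.Set.mem_update _ _ _).mpr (Or.inr he)
      rw [List.set_cons_zero, List.getD_cons_zero, pvFI_cons, if_pos hmem]
      cases hfi : pvFI e (c :: cs) with
      | none => rfl
      | some k =>
        have hk : 0 ≤ k := pvFI_nonneg hfi
        simp only [Nat.cast_zero, min_eq_right hk]
    | succ j' =>
      have hj' : j' < cs.length := by simpa using hj
      rw [List.set_cons_succ, List.getD_cons_succ, pvFI_cons, ih j' hj']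
      by_cases hc : e ∈ c
      · rw [if_pos hc, pvFI_cons, if_pos hc]
        show some 0 = some (min 0 ((j' + 1 : Nat) : Int))
        rw [min_eq_left (by push_cast; omega)]
      · rw [if_neg hc, pvFI_cons, if_neg hc]
        cases pvFI e cs with
        | none => simp
        | some k =>
          simp only [Option.map_some, Option.some.injEq]
          push_cast
          rw [min_add_add_right]

-- pvFI after enlarging cluster j with pair, for a mention not in the pair
theorem pvFI_set_update_not_mem (e : Int) (pair : List Int) (cl : List (List Int)) (j : Nat)
    (he : e ∉ pair) :
    pvFI e (cl.set j (PySem.Set.update (cl.getD j []) pair)) = pvFI e cl := by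
  induction cl generalizing j with
  | nil => rfl
  | cons c cs ih =>
    cases j with
    | zero =>
      have hiff : e ∈ PySem.Set.update c pair ↔ e ∈ c := by
        rw [PySem.Set.mem_update]
        exact or_iff_left he
      rw [List.set_cons_zero, List.getD_cons_zero, pvFI_cons, pvFI_cons]
      simp only [hiff]
    | succ j' =>
      rw [List.set_cons_succ, List.getD_cons_succ, pvFI_cons, pvFI_cons, ih j']

-- one loop step: B's step computes A's step and preserves the invariant
theorem pvStep_eq (cl : List (List Int)) (idx : PySem.Dict Int Int) (pair : List Int)
    (hinv : pvInv cl idx) :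
    (pvBStep (cl, idx) pair).1 =
      (match pvAUpd pair cl with
       | some cl' => cl'
       | none => cl ++ [PySem.Set.ofList pair]) ∧
    pvInv (pvBStep (cl, idx) pair).1 (pvBStep (cl, idx) pair).2 := by
  have hhits : pair.filterMap (fun m => idx.get? m) = pair.filterMap (fun e => pvFI e cl) := by
    congr 1; funext m; exact hinv m
  rw [pvAUpd_eq_scan]
  cases hscan : pvScan pair cl with
  | none =>
    have hmin : PySem.List.min? (pair.filterMap (fun m => idx.get? m)) (fun x => x) = none := by
      rw [hhits, pvMin_eq_scan, hscan]; rfl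
    have hnone : ∀ e ∈ pair, pvFI e cl = none := by
      have h2 : pair.filterMap (fun e => pvFI e cl) = [] := by
        rw [← PySem.List.min?_eq_none_iff (key := fun x : Int => x), pvMin_eq_scan, hscan]
        rfl
      intro e he
      cases hfi : pvFI e cl with
      | none => rfl
      | some k =>
        have : k ∈ pair.filterMap (fun e => pvFI e cl) :=
          List.mem_filterMap.mpr ⟨e, he, hfi⟩
        rw [h2] at this; simp at this
    simp only [pvBStep, hmin]
    refine ⟨rfl, ?_⟩
    intro e
    rw [pvGet_foldl_insert_const, pvFI_append_singleton]
    by_cases he : e ∈ pair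
    · have := hnone e he
      simp only [he, if_pos, this]
      have hm : e ∈ PySem.Set.ofList pair := (PySem.Set.mem_ofList _ _).mpr he
      simp only [hm, if_pos, Option.some.injEq, List.length_append, List.length_cons,
        List.length_nil]
      push_cast
      omega
    · simp only [he, if_neg, not_false_iff, hinv e]
      cases hfi : pvFI e cl with
      | some i => rfl
      | none =>
        have hm : e ∉ PySem.Set.ofList pair := fun h => he ((PySem.Set.mem_ofList _ _).mp h)
        simp [hm]
  | some j =>
    have hj : j < cl.length := pvScan_lt hscan
    have hmin : PySem.List.min? (pair.filterMap (fun m => idx.get? m)) (fun x => x) =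
        some (j : Int) := by
      rw [hhits, pvMin_eq_scan, hscan]; rfl
    simp only [pvBStep, hmin]
    have hget : PySem.List.pyGetD cl ((j : Nat) : Int) ([] : List Int) = cl.getD j [] := by
      rw [PySem.List.pyGetD_natCast]
    have hset : PySem.List.pySetD cl ((j : Nat) : Int)
        (PySem.Set.update (cl.getD j []) pair) =
        cl.set j (PySem.Set.update (cl.getD j []) pair) := by
      rw [PySem.List.pySetD_natCast]
    refine ⟨by rw [hget, hset]; rfl, ?_⟩
    intro e
    rw [hget, hset, pvGet_foldl_insert_min]
    by_cases he : e ∈ pair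
    · rw [if_pos he, pvFI_set_update_mem e pair cl j hj he]
      rw [PySem.Dict.getD_eq_get?_getD, hinv e]
      cases pvFI e cl with
      | none => simp
      | some k => simp
    · rw [if_neg he, pvFI_set_update_not_mem e pair cl j he, hinv e]

-- the whole loop: folding B's step projects to folding A's step
theorem pvFold_eq (rest : List (List Int)) (cl : List (List Int)) (idx : PySem.Dict Int Int)
    (hinv : pvInv cl idx) :
    (rest.foldl pvBStep (cl, idx)).1 =
      rest.foldl (fun cluster_list pair =>
        match pvAUpd pair cluster_list with
        | some cl' => cl'
        | none => cluster_list ++ [PySem.Set.ofList pair]) cl := by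
  induction rest generalizing cl idx with
  | nil => rfl
  | cons pair rest ih =>
    obtain ⟨h1, h2⟩ := pvStep_eq cl idx pair hinv
    simp only [List.foldl_cons]
    rw [← h1]
    exact ih _ _ h2

theorem pvInv_empty : pvInv [] PySem.Dict.empty := by
  intro e; simp [pvFI, PySem.Dict.get?_empty]

-- ===== VERDICT (by name: the statement is the Claim_ definition above) =====
theorem group_mentions_into_clusters_py_spec : Claim_equal_group_mentions_into_clusters_py := by
  intro mention_pairs _
  unfold Spec_group_mentions_into_clusters_py
  unfold group_mentions_into_clusters_py group_mentions_into_clusters_py_alt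
  cases mention_pairs with
  | nil => rfl
  | cons p0 rest =>
    simp only [List.foldl_cons]
    obtain ⟨h1, h2⟩ := pvStep_eq [] PySem.Dict.empty p0 pvInv_empty
    have hA : pvAUpd p0 [] = none := rfl
    rw [hA] at h1
    rw [pvFold_eq rest _ _ h2, h1]
    rfl
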